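-- pv_equiv track=rewrite | github.com/tejdig/ociadbs | oci_db_fleet_management.py | update_physical_server
-- ===== SOURCE A (Python) =====
-- def update_physical_server(data):
--     # Dictionary to map unique next_maintenance_begin times to physical servers
--     maintenance_map = {}
--     server_counter = 1
--
--     # Iterate over compartments and databases
--     for compartment in data:
--         for db in compartment["autonomous_databases"]:
--             next_maintenance = db.get("next_maintenance_begin")
--             current_server = db.get("physical_server")
--
--             # If next_maintenance is already mapped, update with existing server
--             if next_maintenance in maintenance_map:
--                 db["physical_server"] = maintenance_map[next_maintenance]
--             else:
--                 # If current_server is already assigned, use it; otherwise, assign a new server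
--                 if current_server:
--                     maintenance_map[next_maintenance] = current_server
--                 else:
--                     new_server = f"server{server_counter}"
--                     maintenance_map[next_maintenance] = new_server
--                     db["physical_server"] = new_server
--                     server_counter += 1
--
--     return data
-- ===== SOURCE B (Python) =====
-- def update_physical_server(data):
--     # Pass 1: build the maintenance_begin -> server map without mutating anything.
--     maintenance_map = {}
--     server_counter = 1
--     for compartment in data:
--         for db in compartment["autonomous_databases"]:
--             next_maintenance = db.get("next_maintenance_begin")
--             if next_maintenance not in maintenance_map:
--                 current_server = db.get("physical_server")
--                 if current_server:
--                     maintenance_map[next_maintenance] = current_server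
--                 else:
--                     maintenance_map[next_maintenance] = f"server{server_counter}"
--                     server_counter += 1
--     # Pass 2: assign every db the server mapped to its maintenance slot.
--     for compartment in data:
--         for db in compartment["autonomous_databases"]:
--             db["physical_server"] = maintenance_map[db.get("next_maintenance_begin")]
--     return data
-- ===== Notes on version B (the rewrite author's own statement) =====
-- stated objective: alternative
-- what changed: Replaces A's single interleaved mutate-while-scanning loop (three update branches per db) with a two-pass decomposition: pass 1 only builds the next_maintenance_begin->server map (minting fresh serverN names in the same encounter order), pass 2 unconditionally assigns every db maintenance_map[next].
-- outside the precondition, e.g. on update_physical_server([{}]): A raises KeyError, B raises KeyError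
import Mathlib
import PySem

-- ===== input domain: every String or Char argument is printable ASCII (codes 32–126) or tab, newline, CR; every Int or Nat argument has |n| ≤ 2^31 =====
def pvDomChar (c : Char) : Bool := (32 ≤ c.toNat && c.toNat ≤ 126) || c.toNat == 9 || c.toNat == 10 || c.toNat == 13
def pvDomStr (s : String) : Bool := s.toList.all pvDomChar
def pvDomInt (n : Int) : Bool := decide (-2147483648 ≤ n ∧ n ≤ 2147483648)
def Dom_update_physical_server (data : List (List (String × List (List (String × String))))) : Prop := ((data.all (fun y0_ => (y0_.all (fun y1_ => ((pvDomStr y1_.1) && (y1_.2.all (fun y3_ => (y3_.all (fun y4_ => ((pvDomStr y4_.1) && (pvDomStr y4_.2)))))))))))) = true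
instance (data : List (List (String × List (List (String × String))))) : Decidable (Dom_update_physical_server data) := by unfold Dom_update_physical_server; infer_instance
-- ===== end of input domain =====

-- B rebuilds A's interleaved mutate-while-mapping loop as two passes: first build the
-- maintenance->server map alone, then assign every db its mapped server unconditionally.
-- Objective: alternative decomposition, same cost. Both Pythons mutate `data` in place and
-- return it; the theorems here are about the returned value.

-- ===== PORT A =====
-- state threaded by A's loop: (maintenance_map, server_counter)
abbrev pvSt := PySem.Dict (Option String) String × Int

-- one db of A's inner loop: returns the (possibly mutated) db and the new state
def pvStepA (st : pvSt) (db : List (String × String)) : List (String × String) × pvSt :=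
  let d := PySem.Dict.mk db
  let next := d.get? "next_maintenance_begin"
  let cur := d.get? "physical_server"
  match st.1.get? next with
  | some s => ((d.insert "physical_server" s).items, st)
  | none =>
      -- Python's `if current_server:` — truthy iff present and non-empty
      if (cur.getD "") ≠ "" then (db, (st.1.insert next (cur.getD ""), st.2))
      else
        let ns := "server" ++ PySem.Int.toStr st.2
        ((d.insert "physical_server" ns).items, (st.1.insert next ns, st.2 + 1))

-- one compartment of A's outer loop (compartment["autonomous_databases"]; key present by Pre_)
def pvCompA (acc : List (List (String × List (List (String × String)))) × pvSt)
    (comp : List (String × List (List (String × String)))) :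
    List (List (String × List (List (String × String)))) × pvSt :=
  let d := PySem.Dict.mk comp
  let r := (d.getD "autonomous_databases" []).foldl
      (fun (a : List (List (String × String)) × pvSt) db =>
        let p := pvStepA a.2 db
        (a.1 ++ [p.1], p.2)) ([], acc.2)
  (acc.1 ++ [(d.insert "autonomous_databases" r.1).items], r.2)

def update_physical_server (data : List (List (String × List (List (String × String))))) :
    List (List (String × List (List (String × String)))) :=
  (data.foldl pvCompA ([], (PySem.Dict.mk [], 1))).1

-- ===== PORT B =====
-- pass 1, one db: record a server for an unseen maintenance time; no mutation
def pvStep1 (st : pvSt) (db : List (String × String)) : pvSt :=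
  let d := PySem.Dict.mk db
  let next := d.get? "next_maintenance_begin"
  match st.1.get? next with
  | some _ => st
  | none =>
      let cur := ((d.get? "physical_server").getD "")
      if cur ≠ "" then (st.1.insert next cur, st.2)
      else (st.1.insert next ("server" ++ PySem.Int.toStr st.2), st.2 + 1)

def pvBuildMap (data : List (List (String × List (List (String × String))))) : pvSt :=
  data.foldl
    (fun st comp => ((PySem.Dict.mk comp).getD "autonomous_databases" []).foldl pvStep1 st)
    (PySem.Dict.mk [], 1)

-- pass 2, one db: maintenance_map[next]; after pass 1 the key is always present,
-- so the default "" of getD is never used (Python B indexes the dict directly)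
def pvAssign (m : PySem.Dict (Option String) String) (db : List (String × String)) :
    List (String × String) :=
  ((PySem.Dict.mk db).insert "physical_server"
    (m.getD ((PySem.Dict.mk db).get? "next_maintenance_begin") "")).items

def pvAssignComp (m : PySem.Dict (Option String) String)
    (comp : List (String × List (List (String × String)))) :
    List (String × List (List (String × String))) :=
  let d := PySem.Dict.mk comp
  (d.insert "autonomous_databases" ((d.getD "autonomous_databases" []).map (pvAssign m))).items

def update_physical_server_alt (data : List (List (String × List (List (String × String))))) :
    List (List (String × List (List (String × String)))) :=
  data.map (pvAssignComp (pvBuildMap data).1)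

-- ===== PRECONDITION & SPEC =====
-- Pre_ excludes (a) compartments without an "autonomous_databases" key, on which A raises
-- KeyError, and (b) association lists carrying a duplicate "physical_server" key inside a db,
-- which do not represent a Python dict (a real dict cannot hold the key twice).
def Pre_update_physical_server (data : List (List (String × List (List (String × String))))) : Prop :=
  ∀ comp ∈ data, "autonomous_databases" ∈ comp.map Prod.fst ∧
    ∀ db ∈ (PySem.Dict.mk comp).getD "autonomous_databases" [],
      (db.map Prod.fst).count "physical_server" ≤ 1
instance (data : List (List (String × List (List (String × String))))) : Decidable (Pre_update_physical_server data) := by unfold Pre_update_physical_server; infer_instance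

def pvWitness_update_physical_server : (List (List (String × List (List (String × String))))) :=
  [[("autonomous_databases",
      [[("next_maintenance_begin", "t1")],
       [("next_maintenance_begin", "t1"), ("physical_server", "s9")]])]]

def Spec_update_physical_server (data : List (List (String × List (List (String × String))))) (out : List (List (String × List (List (String × String))))) : Prop := out = update_physical_server_alt data
instance (data : List (List (String × List (List (String × String))))) (out : List (List (String × List (List (String × String))))) : Decidable (Spec_update_physical_server data out) := by unfold Spec_update_physical_server; infer_instance

-- ===== CLAIM (what is proved, stated in full; the proofs are below) =====
def Claim_equal_update_physical_server : Prop := ∀ (data : List (List (String × List (List (String × String))))), Dom_update_physical_server data → Pre_update_physical_server data → Spec_update_physical_server data (update_physical_server data)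

-- ===== LEMMAS AND PROOFS =====

-- the map only grows: an entry once present survives to any later state
def pvExt (m m' : PySem.Dict (Option String) String) : Prop :=
  ∀ k v, m.get? k = some v → m'.get? k = some v

theorem pvExt_refl (m : PySem.Dict (Option String) String) : pvExt m m := fun _ _ h => h

theorem pvExt_trans {m₁ m₂ m₃ : PySem.Dict (Option String) String}
    (h₁ : pvExt m₁ m₂) (h₂ : pvExt m₂ m₃) : pvExt m₁ m₃ := fun k v h => h₂ k v (h₁ k v h)

theorem pvExt_step1 (st : pvSt) (db : List (String × String)) :
    pvExt st.1 (pvStep1 st db).1 := by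
  intro k v hk
  unfold pvStep1
  cases hnext : st.1.get? (PySem.Dict.mk db |>.get? "next_maintenance_begin") with
  | some s => simpa [hnext] using hk
  | none =>
      have hne : k ≠ (PySem.Dict.mk db |>.get? "next_maintenance_begin") := by
        intro he; rw [he] at hk; rw [hnext] at hk; cases hk
      simp only [hnext]
      split <;> simpa [PySem.Dict.get?_insert_of_ne _ _ hne] using hk

theorem pvExt_foldl_dbs (dbs : List (List (String × String))) :
    ∀ st : pvSt, pvExt st.1 (dbs.foldl pvStep1 st).1 := by
  induction dbs with
  | nil => intro st; exact pvExt_refl _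
  | cons db t ih =>
      intro st
      exact pvExt_trans (pvExt_step1 st db) (ih (pvStep1 st db))

theorem pvExt_build (l : List (List (String × List (List (String × String))))) :
    ∀ st : pvSt,
      pvExt st.1 (l.foldl
        (fun st comp => ((PySem.Dict.mk comp).getD "autonomous_databases" []).foldl pvStep1 st)
        st).1 := by
  induction l with
  | nil => intro st; exact pvExt_refl _
  | cons comp t ih =>
      intro st
      exact pvExt_trans (pvExt_foldl_dbs _ st) (ih _)

-- re-inserting the value a dict already holds at a non-duplicated key is the identity
theorem pvInsert_self_items (l : List (String × String)) (k c : String)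
    (h1 : (l.map Prod.fst).count k ≤ 1)
    (h2 : (PySem.Dict.mk l).get? k = some c) :
    ((PySem.Dict.mk l).insert k c).items = l := by
  induction l with
  | nil => simp [PySem.Dict.get?] at h2
  | cons p t ih =>
      obtain ⟨a, b⟩ := p
      by_cases hak : a = k
      · subst hak
        have hb : b = c := by
          simpa [PySem.Dict.get?_mk_cons] using h2
        subst hb
        have ht : (t.map Prod.fst).count a = 0 := by
          simp at h1; omega
        have hnot : ∀ q ∈ t, q.1 ≠ a := by
          intro q hq he
          have : q.1 ∈ t.map Prod.fst := List.mem_map_of_mem hq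
          rw [he] at this
          exact absurd (List.count_pos_iff.mpr this) (by omega)
        have hcont : (PySem.Dict.mk ((a, b) :: t)).contains a = true := by
          rw [PySem.Dict.contains_eq_isSome_get?, h2]; rfl
        rw [PySem.Dict.items_insert_of_contains _ _ hcont]
        simp only [List.map_cons, BEq.rfl, if_true, List.cons.injEq, true_and]
        refine (List.map_congr_left ?_).trans (List.map_id _)
        intro q hq
        have : (q.1 == a) = false := by simp [hnot q hq]
        simp [this]
      · have h2' : (PySem.Dict.mk t).get? k = some c := by
          have hne : (a == k) = false := by simp [hak]
          simpa [PySem.Dict.get?_mk_cons, hne] using h2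
        have h1' : (t.map Prod.fst).count k ≤ 1 := by
          simp only [List.map_cons, List.count_cons] at h1; omega
        have hcont : (PySem.Dict.mk ((a, b) :: t)).contains k = true := by
          rw [PySem.Dict.contains_eq_isSome_get?, h2]; rfl
        have hcont' : (PySem.Dict.mk t).contains k = true := by
          rw [PySem.Dict.contains_eq_isSome_get?, h2']; rfl
        have hrec := ih h1' h2'
        rw [PySem.Dict.items_insert_of_contains _ _ hcont'] at hrec
        rw [PySem.Dict.items_insert_of_contains _ _ hcont]
        have hne : (a == k) = false := by simp [hak]
        simp only [List.map_cons, hne, Bool.false_eq_true, if_false]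
        exact congrArg _ hrec

-- A's per-db state transition is exactly B's pass-1 transition
theorem pvStepA_snd (st : pvSt) (db : List (String × String)) :
    (pvStepA st db).2 = pvStep1 st db := by
  unfold pvStepA pvStep1
  cases hnext : st.1.get? (PySem.Dict.mk db |>.get? "next_maintenance_begin") with
  | some s => simp [hnext]
  | none => simp only [hnext]; split <;> rfl

-- A's per-db output equals B's pass-2 assignment under any later map M
theorem pvStepA_fst (st : pvSt) (db : List (String × String))
    (hdb : (db.map Prod.fst).count "physical_server" ≤ 1)
    (M : PySem.Dict (Option String) String)
    (hM : pvExt (pvStep1 st db).1 M) :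
    (pvStepA st db).1 = pvAssign M db := by
  unfold pvStepA pvStep1 pvAssign at *
  cases hnext : st.1.get? (PySem.Dict.mk db |>.get? "next_maintenance_begin") with
  | some s =>
      simp only [hnext] at hM ⊢
      have hs := hM _ s hnext
      rw [PySem.Dict.getD_eq_get?_getD, hs, Option.getD_some]
  | none =>
      simp only [hnext] at hM ⊢
      split_ifs at hM ⊢ with hc
      · have hMnext := hM _ _ (PySem.Dict.get?_insert_self _ _ _)
        rw [PySem.Dict.getD_eq_get?_getD, hMnext, Option.getD_some]
        have hcur : (PySem.Dict.mk db).get? "physical_server"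
            = some (((PySem.Dict.mk db).get? "physical_server").getD "") := by
          cases h : (PySem.Dict.mk db).get? "physical_server" with
          | none => simp [h] at hc
          | some v => simp
        exact (pvInsert_self_items db _ _ hdb hcur).symm
      · have hMnext := hM _ _ (PySem.Dict.get?_insert_self _ _ _)
        rw [PySem.Dict.getD_eq_get?_getD, hMnext, Option.getD_some]

-- A's inner loop over a compartment's dbs = map of B's pass-2 over them, with matching state
theorem pvRunDbs (dbs : List (List (String × String))) :
    ∀ (st : pvSt) (accd : List (List (String × String)))
      (M : PySem.Dict (Option String) String),
      (∀ db ∈ dbs, (db.map Prod.fst).count "physical_server" ≤ 1) →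
      pvExt (dbs.foldl pvStep1 st).1 M →
      dbs.foldl (fun (a : List (List (String × String)) × pvSt) db =>
          let p := pvStepA a.2 db
          (a.1 ++ [p.1], p.2)) (accd, st)
        = (accd ++ dbs.map (pvAssign M), dbs.foldl pvStep1 st) := by
  induction dbs with
  | nil => intro st accd M _ _; simp
  | cons db t ih =>
      intro st accd M hpre hM
      simp only [List.foldl_cons, List.map_cons]
      have hstate : (pvStepA st db).2 = pvStep1 st db := pvStepA_snd st db
      have hfst : (pvStepA st db).1 = pvAssign M db := by
        refine pvStepA_fst st db (hpre db (by simp)) M ?_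
        exact pvExt_trans (pvExt_foldl_dbs t (pvStep1 st db)) hM
      rw [hstate, hfst]
      rw [ih (pvStep1 st db) (accd ++ [pvAssign M db]) M
        (fun d hd => hpre d (by simp [hd])) hM]
      simp

-- A's outer loop = map of B's pass-2 over the compartments, with matching state
theorem pvRunData (l : List (List (String × List (List (String × String))))) :
    ∀ (st : pvSt) (acc : List (List (String × List (List (String × String)))))
      (M : PySem.Dict (Option String) String),
      (∀ comp ∈ l, ∀ db ∈ (PySem.Dict.mk comp).getD "autonomous_databases" [],
        (db.map Prod.fst).count "physical_server" ≤ 1) →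
      pvExt ((l.foldl
        (fun st comp => ((PySem.Dict.mk comp).getD "autonomous_databases" []).foldl pvStep1 st)
        st)).1 M →
      l.foldl pvCompA (acc, st)
        = (acc ++ l.map (pvAssignComp M),
           l.foldl
            (fun st comp => ((PySem.Dict.mk comp).getD "autonomous_databases" []).foldl pvStep1 st)
            st) := by
  induction l with
  | nil => intro st acc M _ _; simp
  | cons comp t ih =>
      intro st acc M hpre hM
      simp only [List.foldl_cons, List.map_cons]
      have hdbs := pvRunDbs ((PySem.Dict.mk comp).getD "autonomous_databases" []) st []
        M (hpre comp (by simp))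
        (pvExt_trans (pvExt_build t _) hM)
      have hcomp : pvCompA (acc, st) comp
          = (acc ++ [pvAssignComp M comp],
             ((PySem.Dict.mk comp).getD "autonomous_databases" []).foldl pvStep1 st) := by
        simp only [pvCompA]
        rw [hdbs]
        simp [pvAssignComp]
      rw [hcomp, ih _ _ M (fun c hc => hpre c (by simp [hc])) hM]
      simp

-- ===== VERDICT (by name: the statement is the Claim_ definition above) =====
theorem update_physical_server_spec : Claim_equal_update_physical_server := by
  intro data _hdom hpre
  unfold Spec_update_physical_server update_physical_server update_physical_server_alt
  rw [pvRunData data (PySem.Dict.mk [], 1) [] (pvBuildMap data).1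
    (fun c hc => (hpre c hc).2) (pvExt_refl _)]
  simp
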